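-- pv_equiv track=rewrite | github.com/marceloqla/MANGA | scripts/4-get_annotations.py | get_index_if_matched
-- ===== SOURCE A (Python) =====
-- def get_index_if_matched(query_aln, match_aln, aaitype=""):
--     query_ipos, query_iaa, match_ipos, match_iaa = 0,0,0,0
--     aaindex_list = []
--     for query_char, match_char in zip(query_aln, match_aln):
--         if query_char not in ["-", "."]:
--             if match_char not in ["-", "."]: # matched
--                 if aaitype == "query":
--                     aaindex_list.append(query_iaa)
--                 elif aaitype == "match":
--                     aaindex_list.append(match_iaa)
--                 else:
--                     aaindex_list.append(match_ipos)
--             query_iaa += 1 # match iaa represents aminoacid 0-index of each aa in query_aln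
--         if match_char not in ["-", "."]:
--             match_iaa += 1 # match iaa represents aminoacid 0-index of each aa in matched_aln
--         match_ipos += 1 # match and query ipos are equal
--         query_ipos += 1 # they represent the local aln position index
--     return aaindex_list
-- ===== SOURCE B (Python) =====
-- def get_index_if_matched(query_aln, match_aln, aaitype=""):
--     GAPS = {"-", "."}
--     n = min(len(query_aln), len(match_aln))
--     q = [query_aln[i] not in GAPS for i in range(n)]
--     m = [match_aln[i] not in GAPS for i in range(n)]
--     q_pre = [0] * (n + 1)
--     m_pre = [0] * (n + 1)
--     for i in range(n):
--         q_pre[i + 1] = q_pre[i] + q[i]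
--         m_pre[i + 1] = m_pre[i] + m[i]
--     if aaitype == "query":
--         return [q_pre[i] for i in range(n) if q[i] and m[i]]
--     elif aaitype == "match":
--         return [m_pre[i] for i in range(n) if q[i] and m[i]]
--     else:
--         return [i for i in range(n) if q[i] and m[i]]
-- ===== Notes on version B (the rewrite author's own statement) =====
-- stated objective: alternative
-- what changed: Replaced A's counter-threaded single scan (four running counters updated per column) by a table-first decomposition: precomputed non-gap boolean masks and prefix-count tables, then one list comprehension per aaitype branch over the matched columns.
import Mathlib
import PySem

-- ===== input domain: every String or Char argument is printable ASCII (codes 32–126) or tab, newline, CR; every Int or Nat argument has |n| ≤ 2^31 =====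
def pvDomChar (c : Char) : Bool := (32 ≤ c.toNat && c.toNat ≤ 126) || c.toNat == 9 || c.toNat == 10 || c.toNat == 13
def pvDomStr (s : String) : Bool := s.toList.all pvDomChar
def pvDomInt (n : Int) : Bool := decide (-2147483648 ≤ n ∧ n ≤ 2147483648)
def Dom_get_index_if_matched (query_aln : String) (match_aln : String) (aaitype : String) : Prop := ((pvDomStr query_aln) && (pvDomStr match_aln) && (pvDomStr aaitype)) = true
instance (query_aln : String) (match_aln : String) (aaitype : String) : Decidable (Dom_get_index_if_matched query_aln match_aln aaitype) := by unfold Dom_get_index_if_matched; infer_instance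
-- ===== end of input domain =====

-- B replaces A's counter-threaded single scan by precomputed non-gap masks and
-- prefix-count tables followed by one comprehension per aaitype branch (objective:
-- alternative decomposition, same asymptotic cost).

-- ===== PORT A =====
-- A: one fold over zip(query, match) threading (query_ipos, query_iaa, match_ipos, match_iaa, acc).
def get_index_if_matched (query_aln : String) (match_aln : String) (aaitype : String) : List Int :=
  let st := (query_aln.toList.zip match_aln.toList).foldl
    (fun (s : Int × Int × Int × Int × List Int) (qm : Char × Char) =>
      let (query_ipos, query_iaa, match_ipos, match_iaa, acc) := s
      let (query_char, match_char) := qm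
      let acc :=
        if ¬ (query_char = '-' ∨ query_char = '.') then
          if ¬ (match_char = '-' ∨ match_char = '.') then
            if aaitype = "query" then acc ++ [query_iaa]
            else if aaitype = "match" then acc ++ [match_iaa]
            else acc ++ [match_ipos]
          else acc
        else acc
      let query_iaa := if ¬ (query_char = '-' ∨ query_char = '.') then query_iaa + 1 else query_iaa
      let match_iaa := if ¬ (match_char = '-' ∨ match_char = '.') then match_iaa + 1 else match_iaa
      (query_ipos + 1, query_iaa, match_ipos + 1, match_iaa, acc))
    (0, 0, 0, 0, [])
  st.2.2.2.2

-- ===== PORT B =====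
-- B helper: the prefix-sum loop (q_pre[i+1] = q_pre[i] + q[i]), as a scan.
def pvScan (a : Int) : List Bool → List Int
  | [] => [a]
  | b :: bs => a :: pvScan (a + (if b then 1 else 0)) bs

def get_index_if_matched_alt (query_aln : String) (match_aln : String) (aaitype : String) : List Int :=
  let ql := query_aln.toList
  let ml := match_aln.toList
  let n := min ql.length ml.length
  let q := (ql.take n).map (fun c => !(c = '-' ∨ c = '.' : Bool))
  let m := (ml.take n).map (fun c => !(c = '-' ∨ c = '.' : Bool))
  let q_pre := pvScan 0 q
  let m_pre := pvScan 0 m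
  if aaitype = "query" then
    (List.range n).filterMap (fun i =>
      if q.getD i false && m.getD i false then some (q_pre.getD i 0) else none)
  else if aaitype = "match" then
    (List.range n).filterMap (fun i =>
      if q.getD i false && m.getD i false then some (m_pre.getD i 0) else none)
  else
    (List.range n).filterMap (fun i =>
      if q.getD i false && m.getD i false then some (i : Int) else none)

-- ===== PRECONDITION & SPEC =====
def Spec_get_index_if_matched (query_aln : String) (match_aln : String) (aaitype : String) (out : List Int) : Prop := out = get_index_if_matched_alt query_aln match_aln aaitype
instance (query_aln : String) (match_aln : String) (aaitype : String) (out : List Int) : Decidable (Spec_get_index_if_matched query_aln match_aln aaitype out) := by unfold Spec_get_index_if_matched; infer_instance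

-- ===== CLAIM (what is proved, stated in full; the proofs are below) =====
def Claim_equal_get_index_if_matched : Prop := ∀ (query_aln : String) (match_aln : String) (aaitype : String), Dom_get_index_if_matched query_aln match_aln aaitype → Spec_get_index_if_matched query_aln match_aln aaitype (get_index_if_matched query_aln match_aln aaitype)

-- ===== LEMMAS AND PROOFS =====

-- reference recursion for A's loop
def auxLoop (t : String) : List (Char × Char) → Int → Int → Int → List Int
  | [], _, _, _ => []
  | (qc, mc) :: rest, qa, ma, ip =>
    (if ¬ (qc = '-' ∨ qc = '.') then
       if ¬ (mc = '-' ∨ mc = '.') then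
         if t = "query" then [qa] else if t = "match" then [ma] else [ip]
       else []
     else [])
    ++ auxLoop t rest
         (if ¬ (qc = '-' ∨ qc = '.') then qa + 1 else qa)
         (if ¬ (mc = '-' ∨ mc = '.') then ma + 1 else ma)
         (ip + 1)

lemma foldA_eq (t : String) (l : List (Char × Char)) :
    ∀ (qp qa mp ma : Int) (acc : List Int),
      (l.foldl
        (fun (s : Int × Int × Int × Int × List Int) (qm : Char × Char) =>
          let (query_ipos, query_iaa, match_ipos, match_iaa, acc) := s
          let (query_char, match_char) := qm
          let acc :=
            if ¬ (query_char = '-' ∨ query_char = '.') then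
              if ¬ (match_char = '-' ∨ match_char = '.') then
                if t = "query" then acc ++ [query_iaa]
                else if t = "match" then acc ++ [match_iaa]
                else acc ++ [match_ipos]
              else acc
            else acc
          let query_iaa := if ¬ (query_char = '-' ∨ query_char = '.') then query_iaa + 1 else query_iaa
          let match_iaa := if ¬ (match_char = '-' ∨ match_char = '.') then match_iaa + 1 else match_iaa
          (query_ipos + 1, query_iaa, match_ipos + 1, match_iaa, acc))
        (qp, qa, mp, ma, acc)).2.2.2.2 = acc ++ auxLoop t l qa ma mp := by
  induction l with
  | nil => intro qp qa mp ma acc; simp [auxLoop]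
  | cons hd tl ih =>
    intro qp qa mp ma acc
    obtain ⟨qc, mc⟩ := hd
    simp only [List.foldl_cons, auxLoop]
    rw [ih]
    by_cases hq : qc = '-' ∨ qc = '.' <;> by_cases hm : mc = '-' ∨ mc = '.' <;>
      simp [hq, hm] <;> split_ifs <;> simp

-- B's comprehension over masks/prefix tables equals the reference recursion, with
-- generalized starting offsets.
lemma filterMap_eq_aux (t : String) :
    ∀ (l1 l2 : List Char) (qa ma ip : Int),
      (List.range (min l1.length l2.length)).filterMap (fun i =>
        let q := (l1.take (min l1.length l2.length)).map (fun c => !(c = '-' ∨ c = '.' : Bool))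
        let m := (l2.take (min l1.length l2.length)).map (fun c => !(c = '-' ∨ c = '.' : Bool))
        if q.getD i false && m.getD i false then
          some (if t = "query" then (pvScan qa q).getD i 0
                else if t = "match" then (pvScan ma m).getD i 0
                else ip + (i : Int))
        else none)
      = auxLoop t (l1.zip l2) qa ma ip := by
  intro l1
  induction l1 with
  | nil => intro l2 qa ma ip; simp [auxLoop]
  | cons qc qs ih =>
    intro l2 qa ma ip
    cases l2 with
    | nil => simp [auxLoop]
    | cons mc ms =>
      have hmin : min (qs.length + 1) (ms.length + 1) = min qs.length ms.length + 1 := by omega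
      simp only [List.length_cons, hmin, List.zip_cons_cons, auxLoop]
      rw [List.range_succ_eq_map]
      rw [List.filterMap_cons, List.filterMap_map]
      have hih := ih ms (if ¬ (qc = '-' ∨ qc = '.') then qa + 1 else qa)
        (if ¬ (mc = '-' ∨ mc = '.') then ma + 1 else ma) (ip + 1)
      by_cases hq : qc = '-' ∨ qc = '.' <;> by_cases hm : mc = '-' ∨ mc = '.' <;>
        · simp only [List.take_succ_cons, List.map_cons, hq, hm] at *
          rw [← hih]
          simp [pvScan, Function.comp]
          split_ifs <;>
            (first
              | rfl
              | ((try refine congrArg (List.cons _) ?_)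
                 refine Eq.trans ?_ (List.nil_append _).symm
                 refine List.filterMap_congr fun i hi => ?_
                 split_ifs with hc
                 · congr 1; omega
                 · rfl))

theorem AB_eq (q m t : String) :
    get_index_if_matched q m t = get_index_if_matched_alt q m t := by
  unfold get_index_if_matched get_index_if_matched_alt
  rw [foldA_eq t (q.toList.zip m.toList) 0 0 0 0 []]
  rw [List.nil_append, ← filterMap_eq_aux t q.toList m.toList 0 0 0]
  split_ifs with h1 h2 <;> (first | rfl | (congr 1; funext i; simp_all))

-- ===== VERDICT (by name: the statement is the Claim_ definition above) =====
theorem get_index_if_matched_spec : Claim_equal_get_index_if_matched := by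
  intro q m t _
  exact AB_eq q m t
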